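-- pv_equiv track=rewrite | github.com/thealper2/codewars-solutions | 7-kyu/right_in_the_centre.py | is_in_middle
-- ===== SOURCE A (Python) =====
-- def is_in_middle(sequence):
--     n = len(sequence)
--     for idx in range(n):
--         if sequence[idx:idx+3] == 'abc':
--             l = len(sequence[:idx])
--             r = len(sequence[idx+3:])
--             if abs(l - r) <= 1:
--                 return True
--
--     return False
-- ===== SOURCE B (Python) =====
-- def is_in_middle(sequence):
--     n = len(sequence)
--     # only indices with |2*idx + 3 - n| <= 1 can be centered: (n-3)//2 .. (n-2)//2
--     for idx in range(max(0, (n - 3) // 2), (n - 2) // 2 + 1):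
--         if sequence[idx:idx+3] == 'abc':
--             return True
--     return False
-- ===== Notes on version B (the rewrite author's own statement) =====
-- stated objective: faster
-- what changed: Instead of scanning every index of the string, B computes the one or two admissible centre indices in closed form ((n-3)//2 .. (n-2)//2) and checks the slice only there.
import Mathlib
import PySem

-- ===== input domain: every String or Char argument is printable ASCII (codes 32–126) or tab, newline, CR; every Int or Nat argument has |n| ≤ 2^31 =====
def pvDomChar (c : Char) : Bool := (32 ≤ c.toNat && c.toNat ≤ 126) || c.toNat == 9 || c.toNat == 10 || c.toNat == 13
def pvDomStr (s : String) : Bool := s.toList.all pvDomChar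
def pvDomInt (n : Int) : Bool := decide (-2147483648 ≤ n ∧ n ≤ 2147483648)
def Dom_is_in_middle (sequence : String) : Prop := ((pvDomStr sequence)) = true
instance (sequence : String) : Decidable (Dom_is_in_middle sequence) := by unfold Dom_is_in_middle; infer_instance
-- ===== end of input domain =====

-- B replaces A's full linear scan by checking the 'abc' slice only at the one or two admissible centre indices, computed in closed form (simpler).


-- ===== PORT A =====
-- literal port of A: scan every idx in range(n); on slice == 'abc' test |len(left) - len(right)| <= 1
def is_in_middle (sequence : String) : Bool :=
  let cs := sequence.toList
  let n : Int := (cs.length : Int)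
  (PySem.List.pyRange 0 n 1).any (fun idx =>
    if PySem.List.slice cs (some idx) (some (idx + 3)) = ['a', 'b', 'c'] then
      let l : Int := ((PySem.List.slice cs none (some idx)).length : Int)
      let r : Int := ((PySem.List.slice cs (some (idx + 3)) none).length : Int)
      decide (|l - r| ≤ 1)
    else false)

-- ===== PORT B =====
-- literal port of B: only the closed-form centre indices (n-3)//2 .. (n-2)//2 are checked
def is_in_middle_alt (sequence : String) : Bool :=
  let cs := sequence.toList
  let n : Int := (cs.length : Int)
  (PySem.List.pyRange (max 0 (PySem.Int.floordiv (n - 3) 2)) (PySem.Int.floordiv (n - 2) 2 + 1) 1).any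
    (fun idx => decide (PySem.List.slice cs (some idx) (some (idx + 3)) = ['a', 'b', 'c']))

-- ===== PRECONDITION & SPEC =====
def Spec_is_in_middle (sequence : String) (out : Bool) : Prop := out = is_in_middle_alt sequence
instance (sequence : String) (out : Bool) : Decidable (Spec_is_in_middle sequence out) := by unfold Spec_is_in_middle; infer_instance

-- ===== CLAIM (what is proved, stated in full; the proofs are below) =====
def Claim_equal_is_in_middle : Prop := ∀ (sequence : String), Dom_is_in_middle sequence → Spec_is_in_middle sequence (is_in_middle sequence)

-- ===== LEMMAS AND PROOFS =====

-- an index whose 3-slice is 'abc' has room for three characters: idx + 3 ≤ n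
lemma slice_abc_bound (cs : List Char) (idx : Int) (h0 : 0 ≤ idx)
    (h : PySem.List.slice cs (some idx) (some (idx + 3)) = ['a', 'b', 'c']) :
    idx + 3 ≤ (cs.length : Int) := by
  have hlen : (PySem.List.slice cs (some idx) (some (idx + 3))).length = 3 := by rw [h]; rfl
  rw [PySem.List.slice_toNat cs h0 (by omega)] at hlen
  simp only [List.length_take, List.length_drop] at hlen
  omega

theorem is_in_middle_spec : Claim_equal_is_in_middle := by
  intro s _
  unfold Spec_is_in_middle is_in_middle is_in_middle_alt
  simp only []
  rw [Bool.eq_iff_iff]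
  simp only [List.any_eq_true, PySem.List.mem_pyRange_one]
  set cs := s.toList with hcs
  set n : Int := (cs.length : Int) with hn
  constructor
  · rintro ⟨idx, ⟨h0, hlt⟩, hP⟩
    by_cases habc : PySem.List.slice cs (some idx) (some (idx + 3)) = ['a', 'b', 'c']
    · simp only [habc, if_true, decide_eq_true_eq] at hP
      have hub := slice_abc_bound cs idx h0 habc
      -- left length = idx, right length = n - idx - 3
      have hl : ((PySem.List.slice cs none (some idx)).length : Int) = idx := by
        rw [PySem.List.slice_to cs h0]
        simp only [List.length_take]
        omega
      have hr : ((PySem.List.slice cs (some (idx + 3)) none).length : Int) = n - idx - 3 := by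
        rw [PySem.List.slice_from cs (by omega)]
        simp only [List.length_drop]
        omega
      rw [hl, hr, abs_le] at hP
      refine ⟨idx, ⟨?_, ?_⟩, by simpa using habc⟩
      · rw [PySem.Int.floordiv_eq_ediv_of_pos (by omega : (0:Int) < 2)]
        omega
      · rw [PySem.Int.floordiv_eq_ediv_of_pos (by omega : (0:Int) < 2)]
        omega
    · simp [habc] at hP
  · rintro ⟨idx, ⟨hlo, hhi⟩, hP⟩
    simp only [decide_eq_true_eq] at hP
    have h0 : 0 ≤ idx := le_trans (le_max_left _ _) hlo
    have hub := slice_abc_bound cs idx h0 hP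
    have hlo' : max 0 (PySem.Int.floordiv (n - 3) 2) ≤ idx := hlo
    rw [PySem.Int.floordiv_eq_ediv_of_pos (by omega : (0:Int) < 2)] at hlo' hhi
    have hl : ((PySem.List.slice cs none (some idx)).length : Int) = idx := by
      rw [PySem.List.slice_to cs h0]
      simp only [List.length_take]
      omega
    have hr : ((PySem.List.slice cs (some (idx + 3)) none).length : Int) = n - idx - 3 := by
      rw [PySem.List.slice_from cs (by omega)]
      simp only [List.length_drop]
      omega
    refine ⟨idx, ⟨h0, by omega⟩, ?_⟩
    simp only [hP, if_true, hl, hr, decide_eq_true_eq]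
    have hlo2 : max 0 ((n - 3) / 2) ≤ idx := hlo'
    rw [abs_le]
    omega
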